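-- pv_equiv track=rewrite | github.com/mytherapy-coding/coding | test/side_effect.py | find_short_words
-- ===== SOURCE A (Python) =====
-- def find_short_words(words):
--     i = 0
--     while i < len(words):
--         if len(words[i]) >= 4:
--             words.pop(i)
--         else:
--             i += 1
--     return words
-- ===== SOURCE B (Python) =====
-- def find_short_words(words):
--     # In-place two-pointer compaction: one forward pass, then trim the tail.
--     w = 0
--     for r in range(len(words)):
--         if len(words[r]) < 4:
--             words[w] = words[r]
--             w += 1
--     del words[w:]
--     return words
-- ===== Notes on version B (the rewrite author's own statement) =====
-- stated objective: faster
-- what changed: Replaces the repeated pop(i) (which shifts the whole tail on every removal) with a single-pass two-pointer in-place compaction followed by one tail trim.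
import Mathlib
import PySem

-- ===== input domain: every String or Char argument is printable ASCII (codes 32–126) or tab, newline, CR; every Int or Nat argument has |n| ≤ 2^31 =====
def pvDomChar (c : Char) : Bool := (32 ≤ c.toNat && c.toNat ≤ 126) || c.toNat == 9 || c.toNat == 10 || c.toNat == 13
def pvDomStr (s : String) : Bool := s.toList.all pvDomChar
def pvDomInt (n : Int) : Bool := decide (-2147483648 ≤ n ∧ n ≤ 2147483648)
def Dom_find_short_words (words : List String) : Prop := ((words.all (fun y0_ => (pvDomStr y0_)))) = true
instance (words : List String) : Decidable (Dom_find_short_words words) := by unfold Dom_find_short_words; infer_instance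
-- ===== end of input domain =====

-- B replaces A's repeated pop(i) with a one-pass two-pointer in-place compaction plus one
-- tail trim; the equivalence proved here is about the returned value (both Pythons mutate
-- the argument list in place in the same observable way).

-- ===== PORT A =====
-- while i < len(words): pop(i) if len(words[i]) >= 4 else i += 1
-- words.pop(i) with 0 ≤ i < len is exactly take i ++ drop (i+1) (exact, index known in range)
def fswLoopA (ws : List String) (i : Nat) : List String :=
  if h : i < ws.length then
    if (ws[i]'h).length ≥ 4 then
      fswLoopA (ws.take i ++ ws.drop (i + 1)) i
    else
      fswLoopA ws (i + 1)
  else ws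
termination_by ws.length - i
decreasing_by
  · simp [List.length_take, List.length_drop]; omega
  · omega

def find_short_words (words : List String) : List String := fswLoopA words 0

-- ===== PORT B =====
-- for r in range(len(words)): if len(words[r]) < 4: words[w] = words[r]; w += 1
-- then del words[w:]; the state is the array plus the write index w
def fswLoopB (arr : List String) (r w : Nat) : List String × Nat :=
  if h : r < arr.length then
    if (arr[r]'h).length < 4 then
      fswLoopB (arr.set w (arr[r]'h)) (r + 1) (w + 1)
    else
      fswLoopB arr (r + 1) w
  else (arr, w)
termination_by arr.length - r
decreasing_by
  · simp; omega
  · omega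

def find_short_words_alt (words : List String) : List String :=
  let res := fswLoopB words 0 0
  res.1.take res.2   -- del words[w:]

-- ===== PRECONDITION & SPEC =====
def Spec_find_short_words (words : List String) (out : List String) : Prop := out = find_short_words_alt words
instance (words : List String) (out : List String) : Decidable (Spec_find_short_words words out) := by unfold Spec_find_short_words; infer_instance

-- ===== CLAIM (what is proved, stated in full; the proofs are below) =====
def Claim_equal_find_short_words : Prop := ∀ (words : List String), Dom_find_short_words words → Spec_find_short_words words (find_short_words words)

-- ===== LEMMAS AND PROOFS =====

theorem fswLoopA_eq (ws : List String) (i : Nat) :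
    fswLoopA ws i = ws.take i ++ (ws.drop i).filter (fun s => decide (s.length < 4)) := by
  fun_induction fswLoopA ws i with
  | case1 ws i h hlong ih =>
    rw [ih]
    have hlen : (ws.take i).length = i := by simp; omega
    rw [List.take_left' hlen, List.drop_left' hlen,
      List.drop_eq_getElem_cons h, List.filter_cons]
    simp [Nat.not_lt.mpr hlong]
  | case2 ws i h hshort ih =>
    rw [ih]
    have hd : ws.drop i = (ws[i]'h) :: ws.drop (i + 1) := List.drop_eq_getElem_cons h
    rw [hd, List.take_add_one, List.filter_cons]
    simp at hshort ⊢
    simp [hshort, List.getElem?_eq_getElem h]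
  | case3 ws i h =>
    have : ws.drop i = [] := List.drop_eq_nil_of_le (by omega)
    simp [this, List.take_of_length_le (by omega : ws.length ≤ i)]

theorem fswLoopB_eq (arr : List String) (r w : Nat) (hwr : w ≤ r) :
    (fswLoopB arr r w).1.take (fswLoopB arr r w).2
      = arr.take w ++ (arr.drop r).filter (fun s => decide (s.length < 4)) := by
  fun_induction fswLoopB arr r w with
  | case1 arr r w h hshort ih =>
    rw [ih (by omega)]
    have hw : w < arr.length := by omega
    have hd : arr.drop r = (arr[r]'h) :: arr.drop (r + 1) := List.drop_eq_getElem_cons h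
    have hdrop : (arr.set w (arr[r]'h)).drop (r + 1) = arr.drop (r + 1) := by
      rw [List.drop_set, if_pos (by omega : w < r + 1)]
    have htake : (arr.set w (arr[r]'h)).take (w + 1) = arr.take w ++ [arr[r]'h] := by
      rw [List.take_set, List.take_succ_eq_append_getElem hw, List.set_append]
      simp [Nat.min_eq_left hw.le]
    rw [hdrop, htake, hd, List.filter_cons]
    simp [hshort, List.append_assoc]
  | case2 arr r w h hshort ih =>
    rw [ih (by omega)]
    have hd : arr.drop r = (arr[r]'h) :: arr.drop (r + 1) := List.drop_eq_getElem_cons h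
    rw [hd, List.filter_cons]
    simp at hshort
    simp [Nat.not_lt.mpr hshort]
  | case3 arr r w h =>
    have : arr.drop r = [] := List.drop_eq_nil_of_le (by omega)
    simp [this]

-- ===== VERDICT (by name: the statement is the Claim_ definition above) =====
theorem find_short_words_spec : Claim_equal_find_short_words := by
  intro words _
  unfold Spec_find_short_words find_short_words find_short_words_alt
  rw [fswLoopA_eq, fswLoopB_eq words 0 0 (le_refl 0)]
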